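-- pv_equiv track=rewrite | github.com/sonalimoorthy/data_science_project- | src/population_data_profiling.py | resolve_population_column
-- ===== SOURCE A (Python) =====
-- def resolve_population_column(columns: list[str]) -> str:
--     """
--     Pick the best available population column.
--     Preference order keeps compatibility with OWID exports that vary by version.
--     """
--     candidates = [
--         "Population (historical estimates)",
--         "Population, total",
--         "Population (historical)",
--         "Population",
--     ]
--     for col in candidates:
--         if col in columns:
--             return col
--     raise KeyError(
--         "Population column not found. Expected one of: "
--         + ", ".join(candidates)
--     )
-- ===== SOURCE B (Python) =====
-- def resolve_population_column(columns: list[str]) -> str: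
--     candidates = [
--         "Population (historical estimates)",
--         "Population, total",
--         "Population (historical)",
--         "Population",
--     ]
--     rank = {c: i for i, c in enumerate(candidates)}
--     best = None  # (rank, name) with the smallest rank seen so far
--     for col in columns:
--         r = rank.get(col)
--         if r is not None and (best is None or r < best[0]):
--             best = (r, col)
--     if best is None:
--         raise KeyError(
--             "Population column not found. Expected one of: "
--             + ", ".join(candidates)
--         )
--     return best[1]
-- ===== Notes on version B (the rewrite author's own statement) =====
-- stated objective: alternative
-- what changed: Instead of probing the four fixed candidates against the columns list (up to 4 membership scans), B builds a rank table once and makes a single pass over the input columns, tracking the minimum-rank candidate seen.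
import Mathlib
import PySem

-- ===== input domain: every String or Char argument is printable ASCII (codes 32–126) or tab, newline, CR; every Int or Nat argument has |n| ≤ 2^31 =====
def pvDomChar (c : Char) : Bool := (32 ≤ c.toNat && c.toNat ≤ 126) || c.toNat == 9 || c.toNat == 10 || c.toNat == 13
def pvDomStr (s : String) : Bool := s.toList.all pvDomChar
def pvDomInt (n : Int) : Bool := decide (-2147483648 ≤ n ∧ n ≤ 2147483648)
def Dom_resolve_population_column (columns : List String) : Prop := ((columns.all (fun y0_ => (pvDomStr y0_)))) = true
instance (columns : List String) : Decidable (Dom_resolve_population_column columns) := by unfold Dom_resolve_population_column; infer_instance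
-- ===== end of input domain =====

-- B replaces A's four membership probes by a single pass over `columns` with a rank
-- table, tracking the minimum-rank candidate (an alternative decomposition of the same task).
-- The equivalence is about the return value on inputs where A returns (Pre_ excludes the KeyError path).

-- ===== PORT A =====
-- A loops over the fixed 4-element candidate list and returns the first candidate that is
-- a member of `columns`; the loop over the literal list is unrolled into the same if-chain.
-- Its `raise KeyError` path is excluded by Pre_; the port returns "" there.
def resolve_population_column (columns : List String) : String :=
  if "Population (historical estimates)" ∈ columns then "Population (historical estimates)"
  else if "Population, total" ∈ columns then "Population, total"
  else if "Population (historical)" ∈ columns then "Population (historical)"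
  else if "Population" ∈ columns then "Population"
  else ""  -- raise KeyError (outside Pre_)

-- ===== PORT B =====
-- rank = {c: i for i, c in enumerate(candidates)}
def pvRank : PySem.Dict String Int :=
  (PySem.List.enumerate ["Population (historical estimates)", "Population, total",
      "Population (historical)", "Population"]).foldl
    (fun d p => d.insert p.2 p.1) PySem.Dict.empty

-- one iteration of B's loop body
def pvStepB (b : Option (Int × String)) (col : String) : Option (Int × String) :=
  match pvRank.get? col with
  | none => b
  | some r =>
    match b with
    | none => some (r, col)
    | some (br, bs) => if r < br then some (r, col) else some (br, bs)

def resolve_population_column_alt (columns : List String) : String :=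
  match columns.foldl pvStepB none with
  | some (_, s) => s
  | none => ""  -- raise KeyError (outside Pre_)

-- ===== PRECONDITION & SPEC =====
-- Pre_ excludes exactly the inputs containing no population candidate, on which A raises KeyError.
def Pre_resolve_population_column (columns : List String) : Prop :=
  "Population (historical estimates)" ∈ columns ∨ "Population, total" ∈ columns ∨
  "Population (historical)" ∈ columns ∨ "Population" ∈ columns
instance (columns : List String) : Decidable (Pre_resolve_population_column columns) := by
  unfold Pre_resolve_population_column; infer_instance

def pvWitness_resolve_population_column : List String := ["Year", "Population, total"]

def Spec_resolve_population_column (columns : List String) (out : String) : Prop := out = resolve_population_column_alt columns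
instance (columns : List String) (out : String) : Decidable (Spec_resolve_population_column columns out) := by unfold Spec_resolve_population_column; infer_instance

-- ===== CLAIM (what is proved, stated in full; the proofs are below) =====
def Claim_equal_resolve_population_column : Prop := ∀ (columns : List String), Dom_resolve_population_column columns → Pre_resolve_population_column columns → Spec_resolve_population_column columns (resolve_population_column columns)

-- ===== LEMMAS AND PROOFS =====

-- left-biased minimum-by-rank on the loop state
def pvBmin (b x : Option (Int × String)) : Option (Int × String) :=
  match b, x with
  | none, x => x
  | some (br, bs), none => some (br, bs)
  | some (br, bs), some (r, s) => if r < br then some (r, s) else some (br, bs)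

lemma pvStepB_eq_bmin (b : Option (Int × String)) (col : String) :
    pvStepB b col = pvBmin b (pvStepB none col) := by
  unfold pvStepB pvBmin
  cases pvRank.get? col <;> cases b <;> rfl

lemma pvBmin_assoc (a b c : Option (Int × String)) :
    pvBmin (pvBmin a b) c = pvBmin a (pvBmin b c) := by
  rcases a with _ | ⟨ar, as⟩ <;> rcases b with _ | ⟨br, bs⟩ <;> rcases c with _ | ⟨cr, cs⟩ <;>
    simp only [pvBmin] <;> split_ifs <;> simp_all <;> (try split_ifs) <;> intros <;>
    first | rfl | omega

lemma pvFoldl_eq_bmin (cs : List String) :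
    ∀ b : Option (Int × String),
      cs.foldl pvStepB b = pvBmin b (cs.foldl pvStepB none) := by
  induction cs with
  | nil => intro b; cases b <;> rfl
  | cons c cs ih =>
    intro b
    simp only [List.foldl_cons]
    rw [ih (pvStepB b c), ih (pvStepB none c), pvStepB_eq_bmin b c, pvBmin_assoc]

-- closed form of B's loop result, by candidate memberships
def pvBest (cs : List String) : Option (Int × String) :=
  if "Population (historical estimates)" ∈ cs then some (0, "Population (historical estimates)")
  else if "Population, total" ∈ cs then some (1, "Population, total")
  else if "Population (historical)" ∈ cs then some (2, "Population (historical)")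
  else if "Population" ∈ cs then some (3, "Population")
  else none

lemma pvRank_get (c : String) :
    pvRank.get? c =
      if c = "Population (historical estimates)" then some 0
      else if c = "Population, total" then some 1
      else if c = "Population (historical)" then some 2
      else if c = "Population" then some 3
      else none := by
  have : pvRank = PySem.Dict.mk
      [("Population (historical estimates)", 0), ("Population, total", 1),
       ("Population (historical)", 2), ("Population", 3)] := by decide
  rw [this]
  by_cases h1 : c = "Population (historical estimates)" <;>
    by_cases h2 : c = "Population, total" <;>
    by_cases h3 : c = "Population (historical)" <;>
    by_cases h4 : c = "Population" <;>
    first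
      | (subst h1; decide)
      | (subst h2; decide)
      | (subst h3; decide)
      | (subst h4; decide)
      | (have g1 : ¬("Population (historical estimates)" = c) := fun e => h1 e.symm
         have g2 : ¬("Population, total" = c) := fun e => h2 e.symm
         have g3 : ¬("Population (historical)" = c) := fun e => h3 e.symm
         have g4 : ¬("Population" = c) := fun e => h4 e.symm
         simp [PySem.Dict.get?, h1, h2, h3, h4, g1, g2, g3, g4])

lemma pvFoldl_none_eq_best (cs : List String) :
    cs.foldl pvStepB none = pvBest cs := by
  induction cs with
  | nil => rfl
  | cons c cs ih =>
    simp only [List.foldl_cons]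
    rw [show List.foldl pvStepB (pvStepB none c) cs = pvBmin (pvStepB none c) (pvBest cs) from
      (pvFoldl_eq_bmin cs (pvStepB none c)).trans (by rw [ih])]
    unfold pvStepB
    rw [pvRank_get c]
    unfold pvBest pvBmin
    simp only [List.mem_cons]
    by_cases h0 : c = "Population (historical estimates)" <;>
      by_cases h1 : c = "Population, total" <;>
      by_cases h2 : c = "Population (historical)" <;>
      by_cases h3 : c = "Population" <;>
      simp_all <;> split_ifs <;> simp_all

-- ===== VERDICT (by name: the statement is the Claim_ definition above) =====
theorem resolve_population_column_spec : Claim_equal_resolve_population_column := by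
  intro columns _ pre
  unfold Spec_resolve_population_column resolve_population_column resolve_population_column_alt
  rw [pvFoldl_none_eq_best]
  unfold pvBest
  rcases pre with h | h | h | h <;> split_ifs <;> simp_all
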